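-- pv_equiv track=rewrite | github.com/tal-tech/chinese_composition_suggest | chinese_essay_grading/essay_grading/base.py | union_symbol
-- ===== SOURCE A (Python) =====
-- def union_symbol(s):
--     dic = {
--         ',':'，',
--         ';':'；',
--         '!':'！',
--         '?':'？',
--         ':':'：',
--         '[' : '【',
--         ']' : '】',
--         '(' : '（',
--         ')' : '）'
--     }
--     for d, d_ in dic.items():
--         s = s.replace(d, d_)
--     return s
-- ===== SOURCE B (Python) =====
-- def union_symbol(s):
--     # idiomatic: one translation table built once, applied in a single pass
--     table = str.maketrans(',;!?:[]()', '，；！？：【】（）')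
--     return s.translate(table)
-- ===== Notes on version B (the rewrite author's own statement) =====
-- stated objective: idiomatic
-- what changed: Replaces nine sequential full-string str.replace passes with a single str.translate pass over a character translation table built by str.maketrans.
import Mathlib
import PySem

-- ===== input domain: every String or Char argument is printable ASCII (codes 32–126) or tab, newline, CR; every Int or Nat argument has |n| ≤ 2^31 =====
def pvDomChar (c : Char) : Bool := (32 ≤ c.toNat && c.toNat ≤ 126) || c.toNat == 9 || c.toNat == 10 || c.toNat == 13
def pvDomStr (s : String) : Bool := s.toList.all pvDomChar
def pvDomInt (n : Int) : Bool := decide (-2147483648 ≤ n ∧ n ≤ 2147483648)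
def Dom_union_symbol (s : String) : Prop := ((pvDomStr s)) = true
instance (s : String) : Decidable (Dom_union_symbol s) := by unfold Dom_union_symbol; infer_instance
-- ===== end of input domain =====

-- B replaces A's nine sequential full-string replace passes by one str.translate pass over a
-- character translation table (objective: idiomatic single-pass translation).

-- ===== PORT A =====
-- dic = {...}; for d, d_ in dic.items(): s = s.replace(d, d_)
def pvDicA : PySem.Dict String String :=
  PySem.Dict.ofList
    [(",", "，"), (";", "；"), ("!", "！"), ("?", "？"), (":", "："),
     ("[", "【"), ("]", "】"), ("(", "（"), (")", "）")]

def union_symbol (s : String) : String :=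
  pvDicA.items.foldl (fun s p => PySem.Str.replace s p.1 p.2) s

-- ===== PORT B =====
-- table = str.maketrans(',;!?:[]()', '，；！？：【】（）')
-- maketrans on two equal-length strings builds a char→char table by zipping; ported by hand, exact.
def pvTable : PySem.Dict Char Char :=
  PySem.Dict.ofList ((",;!?:[]()".toList).zip ("，；！？：【】（）".toList))

-- s.translate(table): each char is replaced by its table entry, unmapped chars pass through; exact.
def union_symbol_alt (s : String) : String :=
  String.ofList (s.toList.map (fun c => (pvTable.get? c).getD c))

-- ===== PRECONDITION & SPEC =====
def Spec_union_symbol (s : String) (out : String) : Prop := out = union_symbol_alt s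
instance (s : String) (out : String) : Decidable (Spec_union_symbol s out) := by unfold Spec_union_symbol; infer_instance

-- ===== CLAIM (what is proved, stated in full; the proofs are below) =====
def Claim_equal_union_symbol : Prop := ∀ (s : String), Dom_union_symbol s → Spec_union_symbol s (union_symbol s)

-- ===== LEMMAS AND PROOFS =====

-- a single replace of one character by one character, as a per-character map
def pvSub (d e : Char) (c : Char) : Char := if c = d then e else c

theorem pvGoSingle (d e : Char) : ∀ (l : List Char) (fuel : Nat) (acc : List Char),
    l.length ≤ fuel →
    PySem.Chars.replace.go [d] [e] fuel l acc = acc.reverse ++ l.map (pvSub d e) := by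
  intro l
  induction l with
  | nil => intro fuel acc h; cases fuel <;> simp [PySem.Chars.replace.go]
  | cons c t ih =>
    intro fuel acc h
    cases fuel with
    | zero => simp at h
    | succ n =>
      simp only [PySem.Chars.replace.go]
      by_cases hc : d = c
      · subst hc
        simp [List.isPrefixOf, pvSub, ih _ _ (by simpa using h)]
      · simp [List.isPrefixOf, hc, pvSub, Ne.symm hc, ih _ _ (by simpa using h)]

theorem pvReplaceSingle (d e : Char) (l : List Char) :
    PySem.Chars.replace l [d] [e] = l.map (pvSub d e) := by
  simp [PySem.Chars.replace, pvGoSingle d e l l.length [] le_rfl]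

-- the composed effect of the nine replaces on one character
def pvF (c : Char) : Char :=
  if c = ',' then '，' else if c = ';' then '；' else if c = '!' then '！' else
  if c = '?' then '？' else if c = ':' then '：' else if c = '[' then '【' else
  if c = ']' then '】' else if c = '(' then '（' else if c = ')' then '）' else c

theorem pvCompEq (c : Char) :
    pvSub ')' '）' (pvSub '(' '（' (pvSub ']' '】' (pvSub '[' '【' (pvSub ':' '：'
      (pvSub '?' '？' (pvSub '!' '！' (pvSub ';' '；' (pvSub ',' '，' c)))))))) = pvF c := by
  by_cases h1 : c = ','; · subst h1; decide
  by_cases h2 : c = ';'; · subst h2; decide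
  by_cases h3 : c = '!'; · subst h3; decide
  by_cases h4 : c = '?'; · subst h4; decide
  by_cases h5 : c = ':'; · subst h5; decide
  by_cases h6 : c = '['; · subst h6; decide
  by_cases h7 : c = ']'; · subst h7; decide
  by_cases h8 : c = '('; · subst h8; decide
  by_cases h9 : c = ')'; · subst h9; decide
  simp [pvSub, pvF, h1, h2, h3, h4, h5, h6, h7, h8, h9]

theorem pvA_eq (s : String) : union_symbol s = String.ofList (s.toList.map pvF) := by
  have hi : pvDicA.items =
      [(",", "，"), (";", "；"), ("!", "！"), ("?", "？"), (":", "："),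
       ("[", "【"), ("]", "】"), ("(", "（"), (")", "）")] := rfl
  have hl : ∀ (d e : Char) (t : String),
      PySem.Str.replace t (String.singleton d) (String.singleton e)
        = String.ofList (t.toList.map (pvSub d e)) := by
    intro d e t
    simp [PySem.Str.replace, pvReplaceSingle]
  simp only [union_symbol, hi, List.foldl]
  rw [show ("," : String) = String.singleton ',' from rfl,
      show ("，" : String) = String.singleton '，' from rfl]
  rw [hl]
  rw [show (";" : String) = String.singleton ';' from rfl,
      show ("；" : String) = String.singleton '；' from rfl, hl]
  rw [show ("!" : String) = String.singleton '!' from rfl,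
      show ("！" : String) = String.singleton '！' from rfl, hl]
  rw [show ("?" : String) = String.singleton '?' from rfl,
      show ("？" : String) = String.singleton '？' from rfl, hl]
  rw [show (":" : String) = String.singleton ':' from rfl,
      show ("：" : String) = String.singleton '：' from rfl, hl]
  rw [show ("[" : String) = String.singleton '[' from rfl,
      show ("【" : String) = String.singleton '【' from rfl, hl]
  rw [show ("]" : String) = String.singleton ']' from rfl,
      show ("】" : String) = String.singleton '】' from rfl, hl]
  rw [show ("(" : String) = String.singleton '(' from rfl,
      show ("（" : String) = String.singleton '（' from rfl, hl]
  rw [show (")" : String) = String.singleton ')' from rfl,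
      show ("）" : String) = String.singleton '）' from rfl, hl]
  simp only [String.toList_ofList, List.map_map]
  refine congrArg String.ofList (List.map_congr_left ?_)
  intro c _
  simpa [Function.comp] using pvCompEq c

-- the per-character table lookup equals pvF
theorem pvGetEq (c : Char) :
    (pvTable.get? c).getD c = pvF c := by
  by_cases h1 : c = ','; · subst h1; decide
  by_cases h2 : c = ';'; · subst h2; decide
  by_cases h3 : c = '!'; · subst h3; decide
  by_cases h4 : c = '?'; · subst h4; decide
  by_cases h5 : c = ':'; · subst h5; decide
  by_cases h6 : c = '['; · subst h6; decide
  by_cases h7 : c = ']'; · subst h7; decide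
  by_cases h8 : c = '('; · subst h8; decide
  by_cases h9 : c = ')'; · subst h9; decide
  have hd : pvTable = PySem.Dict.mk
      [(',', '，'), (';', '；'), ('!', '！'), ('?', '？'), (':', '：'),
       ('[', '【'), (']', '】'), ('(', '（'), (')', '）')] := rfl
  rw [hd]
  simp only [PySem.Dict.get?_mk_cons,
    beq_eq_false_iff_ne.mpr (Ne.symm h1), beq_eq_false_iff_ne.mpr (Ne.symm h2),
    beq_eq_false_iff_ne.mpr (Ne.symm h3), beq_eq_false_iff_ne.mpr (Ne.symm h4),
    beq_eq_false_iff_ne.mpr (Ne.symm h5), beq_eq_false_iff_ne.mpr (Ne.symm h6),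
    beq_eq_false_iff_ne.mpr (Ne.symm h7), beq_eq_false_iff_ne.mpr (Ne.symm h8),
    beq_eq_false_iff_ne.mpr (Ne.symm h9)]
  simp [pvF, h1, h2, h3, h4, h5, h6, h7, h8, h9, PySem.Dict.get?]

-- ===== VERDICT (by name: the statement is the Claim_ definition above) =====
theorem union_symbol_spec : Claim_equal_union_symbol := by
  intro s _
  unfold Spec_union_symbol
  rw [pvA_eq]
  unfold union_symbol_alt
  exact congrArg String.ofList (List.map_congr_left (fun c _ => (pvGetEq c).symm))
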